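-- pv_equiv track=rewrite | github.com/EimySenrioth/2026-contest | CdP2026A/3/facil/3.py | mejor_combinacion
-- ===== SOURCE A (Python) =====
-- from itertools import combinations
--
-- elevadores = {1: 20, 2: 10, 3: 30, 4: 10}
--
-- horas_restringidas = set(range(9, 13))
--
-- def mejor_combinacion(hora):
--     max_elevadores = 2 if hora in horas_restringidas else 4
--     mejor_combo = None
--     mejor_toneladas = 0
--
--     for cantidad in range(1, max_elevadores + 1):
--         for combo in combinations(elevadores.keys(), cantidad):
--             toneladas = sum(elevadores[e] for e in combo)
--             if toneladas > mejor_toneladas: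
--                 mejor_toneladas = toneladas
--                 mejor_combo = combo
--
--     return mejor_combo, mejor_toneladas
-- ===== SOURCE B (Python) =====
-- elevadores = {1: 20, 2: 10, 3: 30, 4: 10}
--
-- horas_restringidas = set(range(9, 13))
--
-- def mejor_combinacion(hora):
--     # All weights are positive, so the optimum uses the full allowed count:
--     # pick the k heaviest elevators and report their ids in ascending order.
--     k = 2 if 9 <= hora < 13 else 4
--     top = sorted(elevadores, key=lambda e: elevadores[e], reverse=True)[:k]
--     sel = sorted(top)
--     return tuple(sel), sum(elevadores[e] for e in sel)
-- ===== Notes on version B (the rewrite author's own statement) =====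
-- stated objective: simpler
-- what changed: Replaced the exhaustive enumeration of all elevator combinations of every size with a single greedy top-k selection: since all weights are positive the optimum takes the full allowed count of elevators, so B sorts ids by weight descending, keeps the first k, and returns them sorted ascending with their weight sum.
import Mathlib
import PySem

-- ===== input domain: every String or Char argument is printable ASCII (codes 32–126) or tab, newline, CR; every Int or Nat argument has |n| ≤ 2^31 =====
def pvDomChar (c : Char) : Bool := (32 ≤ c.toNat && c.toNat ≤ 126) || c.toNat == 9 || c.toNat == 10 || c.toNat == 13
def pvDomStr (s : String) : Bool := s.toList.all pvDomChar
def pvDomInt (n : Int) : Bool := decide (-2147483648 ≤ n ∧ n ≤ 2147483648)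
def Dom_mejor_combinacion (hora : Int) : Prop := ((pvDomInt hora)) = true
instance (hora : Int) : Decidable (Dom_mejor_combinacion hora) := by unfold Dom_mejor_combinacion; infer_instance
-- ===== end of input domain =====

-- B replaces the exhaustive combinations enumeration by a greedy top-k selection
-- (all weights are positive, so the optimum uses the full allowed count); simpler.

-- ===== PORT A =====
-- elevadores = {1: 20, 2: 10, 3: 30, 4: 10}
def pvElevadores : PySem.Dict Int Int := PySem.Dict.ofList [(1, 20), (2, 10), (3, 30), (4, 10)]

-- horas_restringidas = set(range(9, 13))
def pvHorasRestringidas : PySem.Set Int := PySem.Set.ofList (PySem.List.pyRange 9 13 1)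

-- itertools.combinations over a list, in itertools' lexicographic order
def pvCombinations : List Int → Nat → List (List Int)
  | _, 0 => [[]]
  | [], _ + 1 => []
  | x :: rest, k + 1 => (pvCombinations rest k).map (x :: ·) ++ pvCombinations rest (k + 1)

def mejor_combinacion (hora : Int) : List Int × Int :=
  let max_elevadores : Int := if hora ∈ pvHorasRestringidas then 2 else 4
  -- mejor_combo = None; mejor_toneladas = 0; double loop updating both
  let st :=
    (PySem.List.pyRange 1 (max_elevadores + 1) 1).foldl
      (fun (st : Option (List Int) × Int) cantidad =>
        (pvCombinations pvElevadores.keys cantidad.toNat).foldl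
          (fun st combo =>
            let toneladas := (combo.map (fun e => pvElevadores.getD e 0)).sum
            if toneladas > st.2 then (some combo, toneladas) else st)
          st)
      (none, 0)
  -- A can only return mejor_combo = None as (None, 0); the type maps None to []
  (st.1.getD [], st.2)

-- ===== PORT B =====
def mejor_combinacion_alt (hora : Int) : List Int × Int :=
  let k : Int := if 9 ≤ hora ∧ hora < 13 then 2 else 4
  let top := PySem.List.slice
    (PySem.List.sorted pvElevadores.keys (fun e => pvElevadores.getD e 0) true)
    none (some k)
  let sel := PySem.List.sorted top (fun e => e) false
  (sel, (sel.map (fun e => pvElevadores.getD e 0)).sum)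

-- ===== PRECONDITION & SPEC =====
def Spec_mejor_combinacion (hora : Int) (out : List Int × Int) : Prop := out = mejor_combinacion_alt hora
instance (hora : Int) (out : List Int × Int) : Decidable (Spec_mejor_combinacion hora out) := by unfold Spec_mejor_combinacion; infer_instance

-- ===== CLAIM (what is proved, stated in full; the proofs are below) =====
def Claim_equal_mejor_combinacion : Prop := ∀ (hora : Int), Dom_mejor_combinacion hora → Spec_mejor_combinacion hora (mejor_combinacion hora)

-- ===== LEMMAS AND PROOFS =====

-- the two programs test the restricted hours by the same arithmetic condition
theorem pv_mem_iff (hora : Int) : (hora ∈ pvHorasRestringidas) ↔ (9 ≤ hora ∧ hora < 13) := by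
  rw [show pvHorasRestringidas = ([9, 10, 11, 12] : List Int) from rfl]
  simp only [List.mem_cons, List.not_mem_nil, or_false]
  omega

-- ===== VERDICT (by name: the statement is the Claim_ definition above) =====
theorem mejor_combinacion_spec : Claim_equal_mejor_combinacion := by
  intro hora _
  show mejor_combinacion hora = mejor_combinacion_alt hora
  by_cases h : 9 ≤ hora ∧ hora < 13
  · rw [show mejor_combinacion hora
        = (let max_elevadores : Int := if hora ∈ pvHorasRestringidas then 2 else 4
           let st :=
             (PySem.List.pyRange 1 (max_elevadores + 1) 1).foldl
               (fun (st : Option (List Int) × Int) cantidad =>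
                 (pvCombinations pvElevadores.keys cantidad.toNat).foldl
                   (fun st combo =>
                     let toneladas := (combo.map (fun e => pvElevadores.getD e 0)).sum
                     if toneladas > st.2 then (some combo, toneladas) else st)
                   st)
               (none, 0)
           (st.1.getD [], st.2)) from rfl]
    rw [if_pos ((pv_mem_iff hora).mpr h)]
    rw [show mejor_combinacion_alt hora
        = (let k : Int := if 9 ≤ hora ∧ hora < 13 then 2 else 4
           let top := PySem.List.slice
             (PySem.List.sorted pvElevadores.keys (fun e => pvElevadores.getD e 0) true)
             none (some k)
           let sel := PySem.List.sorted top (fun e => e) false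
           (sel, (sel.map (fun e => pvElevadores.getD e 0)).sum)) from rfl]
    rw [if_pos h]
    decide
  · rw [show mejor_combinacion hora
        = (let max_elevadores : Int := if hora ∈ pvHorasRestringidas then 2 else 4
           let st :=
             (PySem.List.pyRange 1 (max_elevadores + 1) 1).foldl
               (fun (st : Option (List Int) × Int) cantidad =>
                 (pvCombinations pvElevadores.keys cantidad.toNat).foldl
                   (fun st combo =>
                     let toneladas := (combo.map (fun e => pvElevadores.getD e 0)).sum
                     if toneladas > st.2 then (some combo, toneladas) else st)
                   st)
               (none, 0)
           (st.1.getD [], st.2)) from rfl]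
    rw [if_neg (fun hc => h ((pv_mem_iff hora).mp hc))]
    rw [show mejor_combinacion_alt hora
        = (let k : Int := if 9 ≤ hora ∧ hora < 13 then 2 else 4
           let top := PySem.List.slice
             (PySem.List.sorted pvElevadores.keys (fun e => pvElevadores.getD e 0) true)
             none (some k)
           let sel := PySem.List.sorted top (fun e => e) false
           (sel, (sel.map (fun e => pvElevadores.getD e 0)).sum)) from rfl]
    rw [if_neg h]
    decide
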